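-- pv_equiv track=rewrite | github.com/realDylio/AdventOfCode2023_18 | problem_18.py | findNumOutside
-- ===== SOURCE A (Python) =====
-- def findNumOutside(corners, pipes):
--     ans = 0
--     for c in corners:
--         x = c[0]
--         y = c[1]
--
--         numpipes = 0
--         for p in pipes:
--             x1 = p[0]
--             y1 = p[1]
--             y2 = p[2]
--             if x1 < x and y1 <= y <= y2:
--                 numpipes += 1
--
--         ans += findNumForOneSquare(c, corners, numpipes)
--
--     return ans
--
-- def findNumForOneSquare(c, corners, numpipes):
--     x = c[0]
--     y = c[1]
--
--     ans = 0
--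
--     if y == 0 and x == 6:
--         poo  = 1
--
--     #upper left corner
--     numpass = 0
--     for c in corners:
--         x1 = c[0]
--         y1 = c[1]
--         curd = c[2]
--         if y == y1 and x1 < x and (curd[0] == "D" or curd[1] == "U"):
--             numpass += 1
--
--     if (numpass+numpipes) % 2 == 0:
--         ans += 1
--
--     #upper right corner
--     numpass = 0
--     for c in corners:
--         x1 = c[0]
--         y1 = c[1]
--         curd = c[2]
--         if y == y1 and x1 <= x and (curd[0] == "D" or curd[1] == "U"):
--             numpass += 1
--
--     if (numpass+numpipes) % 2 == 0:
--         ans += 1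
--
--     #lower left corner
--     numpass = 0
--     for c in corners:
--         x1 = c[0]
--         y1 = c[1]
--         curd = c[2]
--         if y == y1 and x1 < x and (curd[1] == "D" or curd[0] == "U"):
--             numpass += 1
--
--     if (numpass+numpipes) % 2 == 0:
--         ans += 1
--
--     #lower right corner
--     numpass = 0
--     for c in corners:
--         x1 = c[0]
--         y1 = c[1]
--         curd = c[2]
--         if y == y1 and x1 <= x and (curd[1] == "D" or curd[0] == "U"):
--             numpass += 1
--
--     if (numpass+numpipes) % 2 == 0:
--         ans += 1
--
--     return ans
-- ===== SOURCE B (Python) =====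
-- def _up(d):
--     return d[0] == "D" or d[1] == "U"
--
-- def _down(d):
--     return d[1] == "D" or d[0] == "U"
--
-- def findNumOutside(corners, pipes):
--     # Group corner x-coordinates by row once, so the four per-corner scans over
--     # ALL corners become counts over the same-row group only.
--     ups = {}     # y -> x's of corners passing the "up" test
--     downs = {}   # y -> x's of corners passing the "down" test
--     for (x1, y1, d) in corners:
--         if _up(d):
--             ups.setdefault(y1, []).append(x1)
--         if _down(d):
--             downs.setdefault(y1, []).append(x1)
--     ans = 0
--     for (x, y, _d) in corners:
--         numpipes = 0
--         for (px, py1, py2) in pipes: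
--             if px < x and py1 <= y <= py2:
--                 numpipes += 1
--         uxs = ups.get(y, [])
--         dxs = downs.get(y, [])
--         for k in (sum(1 for v in uxs if v < x),
--                   sum(1 for v in uxs if v <= x),
--                   sum(1 for v in dxs if v < x),
--                   sum(1 for v in dxs if v <= x)):
--             if (k + numpipes) % 2 == 0:
--                 ans += 1
--     return ans
-- ===== Notes on version B (the rewrite author's own statement) =====
-- stated objective: faster
-- what changed: Instead of rescanning the whole corner list four times per corner, B builds two dictionaries (row y -> x-coordinates of up-type / down-type corners) once and counts within the same-row group only, keeping the pipe scan per corner.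
import Mathlib
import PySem

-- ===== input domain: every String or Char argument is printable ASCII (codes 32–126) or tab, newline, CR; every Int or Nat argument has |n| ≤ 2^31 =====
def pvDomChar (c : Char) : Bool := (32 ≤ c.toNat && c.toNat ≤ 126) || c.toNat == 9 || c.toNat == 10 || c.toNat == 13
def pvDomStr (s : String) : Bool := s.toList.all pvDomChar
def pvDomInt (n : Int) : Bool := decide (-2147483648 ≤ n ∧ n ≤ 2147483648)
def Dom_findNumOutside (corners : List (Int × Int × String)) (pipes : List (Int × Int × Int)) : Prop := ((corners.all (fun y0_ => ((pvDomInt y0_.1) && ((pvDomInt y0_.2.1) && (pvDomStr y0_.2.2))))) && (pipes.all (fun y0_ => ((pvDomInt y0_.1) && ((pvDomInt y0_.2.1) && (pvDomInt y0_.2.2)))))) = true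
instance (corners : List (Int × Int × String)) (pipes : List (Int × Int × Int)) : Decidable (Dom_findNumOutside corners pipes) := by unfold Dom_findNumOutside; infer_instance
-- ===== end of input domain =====

-- B replaces A's four whole-corner-list rescans per corner by two row-grouping
-- dictionaries built once; proved equal to A on inputs where A returns (direction
-- strings of length ≥ 2), measured faster.


-- ===== PORT A =====
-- findNumForOneSquare, transliterated (the dead 'poo' assignment has no effect and is dropped);
-- curd[0] == "D" etc. are PySem.Str.pyGet? comparisons (exact on Pre_, where len ≥ 2)
def findNumForOneSquare (c : Int × Int × String) (corners : List (Int × Int × String)) (numpipes : Int) : Int :=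
  let x := c.1
  let y := c.2.1
  let ans : Int := 0
  -- upper left corner
  let numpass := corners.foldl (fun acc c' =>
    if y == c'.2.1 && c'.1 < x && (PySem.Str.pyGet? c'.2.2 0 == some 'D' || PySem.Str.pyGet? c'.2.2 1 == some 'U')
    then acc + 1 else acc) (0 : Int)
  let ans := if PySem.Int.mod (numpass + numpipes) 2 == 0 then ans + 1 else ans
  -- upper right corner
  let numpass := corners.foldl (fun acc c' =>
    if y == c'.2.1 && c'.1 ≤ x && (PySem.Str.pyGet? c'.2.2 0 == some 'D' || PySem.Str.pyGet? c'.2.2 1 == some 'U')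
    then acc + 1 else acc) (0 : Int)
  let ans := if PySem.Int.mod (numpass + numpipes) 2 == 0 then ans + 1 else ans
  -- lower left corner
  let numpass := corners.foldl (fun acc c' =>
    if y == c'.2.1 && c'.1 < x && (PySem.Str.pyGet? c'.2.2 1 == some 'D' || PySem.Str.pyGet? c'.2.2 0 == some 'U')
    then acc + 1 else acc) (0 : Int)
  let ans := if PySem.Int.mod (numpass + numpipes) 2 == 0 then ans + 1 else ans
  -- lower right corner
  let numpass := corners.foldl (fun acc c' =>
    if y == c'.2.1 && c'.1 ≤ x && (PySem.Str.pyGet? c'.2.2 1 == some 'D' || PySem.Str.pyGet? c'.2.2 0 == some 'U')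
    then acc + 1 else acc) (0 : Int)
  let ans := if PySem.Int.mod (numpass + numpipes) 2 == 0 then ans + 1 else ans
  ans

def findNumOutside (corners : List (Int × Int × String)) (pipes : List (Int × Int × Int)) : Int :=
  corners.foldl (fun ans c =>
    let x := c.1
    let y := c.2.1
    let numpipes := pipes.foldl (fun acc p =>
      if p.1 < x && p.2.1 ≤ y && y ≤ p.2.2 then acc + 1 else acc) (0 : Int)
    ans + findNumForOneSquare c corners numpipes) 0

-- ===== PORT B =====
def altUpTest (d : String) : Bool :=
  PySem.Str.pyGet? d 0 == some 'D' || PySem.Str.pyGet? d 1 == some 'U'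

def altDownTest (d : String) : Bool :=
  PySem.Str.pyGet? d 1 == some 'D' || PySem.Str.pyGet? d 0 == some 'U'

-- setdefault(y, []).append(x) has the effect d[y] = d.get(y, []) + [x], i.e. Dict.modify
def findNumOutside_alt (corners : List (Int × Int × String)) (pipes : List (Int × Int × Int)) : Int :=
  let ud := corners.foldl
    (fun (ud : PySem.Dict Int (List Int) × PySem.Dict Int (List Int)) c =>
      let ups := if altUpTest c.2.2 then ud.1.modify c.2.1 [] (· ++ [c.1]) else ud.1
      let downs := if altDownTest c.2.2 then ud.2.modify c.2.1 [] (· ++ [c.1]) else ud.2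
      (ups, downs))
    (PySem.Dict.empty, PySem.Dict.empty)
  corners.foldl (fun ans c =>
    let x := c.1
    let y := c.2.1
    let numpipes := pipes.foldl (fun acc p =>
      if p.1 < x && p.2.1 ≤ y && y ≤ p.2.2 then acc + 1 else acc) (0 : Int)
    let uxs := ud.1.getD y []
    let dxs := ud.2.getD y []
    [((uxs.countP (fun v => v < x) : Nat) : Int),
     ((uxs.countP (fun v => v ≤ x) : Nat) : Int),
     ((dxs.countP (fun v => v < x) : Nat) : Int),
     ((dxs.countP (fun v => v ≤ x) : Nat) : Int)].foldl
      (fun a k => if PySem.Int.mod (k + numpipes) 2 == 0 then a + 1 else a) ans) 0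

-- ===== PRECONDITION & SPEC =====
-- Pre_ excludes exactly the inputs where Python A raises IndexError: some corner's
-- direction string has length < 2 (its chars are indexed when the corner meets itself).
def Pre_findNumOutside (corners : List (Int × Int × String)) (pipes : List (Int × Int × Int)) : Prop :=
  ∀ c ∈ corners, 2 ≤ c.2.2.toList.length
instance (corners : List (Int × Int × String)) (pipes : List (Int × Int × Int)) : Decidable (Pre_findNumOutside corners pipes) := by unfold Pre_findNumOutside; infer_instance

def pvWitness_findNumOutside : (List (Int × Int × String)) × (List (Int × Int × Int)) :=
  ([(0, 0, "DR"), (2, 0, "RD")], [(1, -1, 1)])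

def Spec_findNumOutside (corners : List (Int × Int × String)) (pipes : List (Int × Int × Int)) (out : Int) : Prop := out = findNumOutside_alt corners pipes
instance (corners : List (Int × Int × String)) (pipes : List (Int × Int × Int)) (out : Int) : Decidable (Spec_findNumOutside corners pipes out) := by unfold Spec_findNumOutside; infer_instance

-- ===== CLAIM (what is proved, stated in full; the proofs are below) =====
def Claim_equal_findNumOutside : Prop := ∀ (corners : List (Int × Int × String)) (pipes : List (Int × Int × Int)), Dom_findNumOutside corners pipes → Pre_findNumOutside corners pipes → Spec_findNumOutside corners pipes (findNumOutside corners pipes)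

-- ===== LEMMAS AND PROOFS =====

-- the pair-of-dicts fold splits into two independent folds
theorem pairFold_split (cs : List (Int × Int × String))
    (a b : PySem.Dict Int (List Int)) :
    cs.foldl (fun (ud : PySem.Dict Int (List Int) × PySem.Dict Int (List Int)) c =>
      let ups := if altUpTest c.2.2 then ud.1.modify c.2.1 [] (· ++ [c.1]) else ud.1
      let downs := if altDownTest c.2.2 then ud.2.modify c.2.1 [] (· ++ [c.1]) else ud.2
      (ups, downs)) (a, b)
    = (cs.foldl (fun d c => if altUpTest c.2.2 then d.modify c.2.1 [] (· ++ [c.1]) else d) a,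
       cs.foldl (fun d c => if altDownTest c.2.2 then d.modify c.2.1 [] (· ++ [c.1]) else d) b) := by
  induction cs generalizing a b with
  | nil => rfl
  | cons c rest ih => simp only [List.foldl_cons]; exact ih _ _

-- lookup in a conditionally-built grouping dict = the x's of the matching corners
theorem getD_condBuild (flag : (Int × Int × String) → Bool) (cs : List (Int × Int × String))
    (d : PySem.Dict Int (List Int)) (y : Int) :
    (cs.foldl (fun d c => if flag c then d.modify c.2.1 [] (· ++ [c.1]) else d) d).getD y []
    = d.getD y [] ++ (cs.filter (fun c => flag c && c.2.1 == y)).map (·.1) := by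
  induction cs generalizing d with
  | nil => simp
  | cons c rest ih =>
    simp only [List.foldl_cons, List.filter_cons]
    by_cases hf : flag c
    · by_cases hy : c.2.1 = y
      · simp [hf, hy, ih]
      · simp [hf, hy, ih, PySem.Dict.getD_modify, Ne.symm hy]
    · simp [hf, ih]

-- A's numpass scan = B's count over the matching-row group
theorem count_match (flag : String → Bool) (cmp : Int → Int → Bool)
    (corners : List (Int × Int × String)) (x y : Int) :
    corners.foldl (fun acc c' =>
      if y == c'.2.1 && cmp c'.1 x && flag c'.2.2 then acc + 1 else acc) (0 : Int)
    = (((corners.filter (fun c => flag c.2.2 && c.2.1 == y)).map (·.1)).countP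
        (fun v => cmp v x) : Nat) := by
  rw [PySem.List.foldl_if_add_one]
  simp only [List.countP_map, List.countP_filter, zero_add, Int.natCast_inj]
  apply List.countP_congr
  intro c _
  simp only [Function.comp_apply]
  by_cases h3 : c.2.1 = y
  · subst h3; cases flag c.2.2 <;> cases cmp c.1 x <;> simp
  · simp [beq_iff_eq, h3, Ne.symm h3]

-- four concrete instances of count_match (the conditions as port A writes them)
theorem count_match_ult (corners : List (Int × Int × String)) (x y : Int) :
    corners.foldl (fun acc c' =>
      if y == c'.2.1 && c'.1 < x && (PySem.Str.pyGet? c'.2.2 0 == some 'D' || PySem.Str.pyGet? c'.2.2 1 == some 'U')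
      then acc + 1 else acc) (0 : Int)
    = (((corners.filter (fun c => (PySem.Str.pyGet? c.2.2 0 == some 'D' || PySem.Str.pyGet? c.2.2 1 == some 'U') && c.2.1 == y)).map (·.1)).countP
        (fun v => v < x) : Nat) :=
  count_match (fun s => PySem.Str.pyGet? s 0 == some 'D' || PySem.Str.pyGet? s 1 == some 'U') (fun a b => a < b) corners x y

theorem count_match_ule (corners : List (Int × Int × String)) (x y : Int) :
    corners.foldl (fun acc c' =>
      if y == c'.2.1 && c'.1 ≤ x && (PySem.Str.pyGet? c'.2.2 0 == some 'D' || PySem.Str.pyGet? c'.2.2 1 == some 'U')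
      then acc + 1 else acc) (0 : Int)
    = (((corners.filter (fun c => (PySem.Str.pyGet? c.2.2 0 == some 'D' || PySem.Str.pyGet? c.2.2 1 == some 'U') && c.2.1 == y)).map (·.1)).countP
        (fun v => v ≤ x) : Nat) :=
  count_match (fun s => PySem.Str.pyGet? s 0 == some 'D' || PySem.Str.pyGet? s 1 == some 'U') (fun a b => a ≤ b) corners x y

theorem count_match_dlt (corners : List (Int × Int × String)) (x y : Int) :
    corners.foldl (fun acc c' =>
      if y == c'.2.1 && c'.1 < x && (PySem.Str.pyGet? c'.2.2 1 == some 'D' || PySem.Str.pyGet? c'.2.2 0 == some 'U')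
      then acc + 1 else acc) (0 : Int)
    = (((corners.filter (fun c => (PySem.Str.pyGet? c.2.2 1 == some 'D' || PySem.Str.pyGet? c.2.2 0 == some 'U') && c.2.1 == y)).map (·.1)).countP
        (fun v => v < x) : Nat) :=
  count_match (fun s => PySem.Str.pyGet? s 1 == some 'D' || PySem.Str.pyGet? s 0 == some 'U') (fun a b => a < b) corners x y

theorem count_match_dle (corners : List (Int × Int × String)) (x y : Int) :
    corners.foldl (fun acc c' =>
      if y == c'.2.1 && c'.1 ≤ x && (PySem.Str.pyGet? c'.2.2 1 == some 'D' || PySem.Str.pyGet? c'.2.2 0 == some 'U')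
      then acc + 1 else acc) (0 : Int)
    = (((corners.filter (fun c => (PySem.Str.pyGet? c.2.2 1 == some 'D' || PySem.Str.pyGet? c.2.2 0 == some 'U')  && c.2.1 == y)).map (·.1)).countP
        (fun v => v ≤ x) : Nat) :=
  count_match (fun s => PySem.Str.pyGet? s 1 == some 'D' || PySem.Str.pyGet? s 0 == some 'U') (fun a b => a ≤ b) corners x y

-- ===== VERDICT (by name: the statement is the Claim_ definition above) =====
set_option maxHeartbeats 4000000 in
theorem findNumOutside_spec : Claim_equal_findNumOutside := by
  intro corners pipes _ _
  show findNumOutside corners pipes = findNumOutside_alt corners pipes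
  simp only [findNumOutside, findNumOutside_alt]
  rw [pairFold_split]
  apply PySem.List.foldl_congr_mem
  intro ans c _
  dsimp only
  rw [getD_condBuild (fun c => altUpTest c.2.2) corners PySem.Dict.empty c.2.1,
      getD_condBuild (fun c => altDownTest c.2.2) corners PySem.Dict.empty c.2.1]
  simp only [altUpTest, altDownTest, List.foldl_cons, List.foldl_nil, findNumForOneSquare,
             PySem.Dict.getD_empty, List.nil_append]
  rw [count_match_ult, count_match_ule, count_match_dlt, count_match_dle]
  split_ifs <;> ring
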